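-- pv_equiv track=rewrite | github.com/Bellboy-Capstone/System | bellboy/actors/lcd.py | chop_string
-- ===== SOURCE A (Python) =====
-- def chop_string(text):
--     """"
--     Divides sentence into 2 pieces, the first fits in 16 charcaters, the second is the leftover.
--     Already centered if in range of 16 charcaters .
--     """
--     words = text.split()  # split text by whitespace
--     builder = None
--     finalStrings = []
--     firstLine = None
--
--     for word in words:
--         if builder is None:
--             builder = word
--             continue
--
--         if firstLine is None and len(builder) + len(word) + 1 > 16:
--
--             firstLine = builder.center(16)
--
--             builder = word
--             continue
--
--         builder += " " + word
--
--     if len(builder) < 16: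
--         builder = builder.center(16)
--
--     return [firstLine, builder]
-- ===== SOURCE B (Python) =====
-- def chop_string(text):
--     """Split-index re-implementation: one length-only scan finds where the first
--     line ends, then slices+joins build the result."""
--     words = text.split()
--     split = None
--     total = -1
--     for i, w in enumerate(words):
--         total += len(w) + 1
--         if i >= 1 and total > 16:
--             split = i
--             break
--     if split is None:
--         firstLine, builder = None, ' '.join(words)
--     else:
--         firstLine = ' '.join(words[:split]).center(16)
--         builder = ' '.join(words[split:])
--     if len(builder) < 16:
--         builder = builder.center(16)
--     return [firstLine, builder]
-- ===== Notes on version B (the rewrite author's own statement) =====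
-- stated objective: alternative
-- what changed: A builds the result by mutating a string accumulator word by word (concatenating and closing the first line mid-loop); B scans only word lengths once to find the split index, then builds both lines with slices and a single join each.
import Mathlib
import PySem

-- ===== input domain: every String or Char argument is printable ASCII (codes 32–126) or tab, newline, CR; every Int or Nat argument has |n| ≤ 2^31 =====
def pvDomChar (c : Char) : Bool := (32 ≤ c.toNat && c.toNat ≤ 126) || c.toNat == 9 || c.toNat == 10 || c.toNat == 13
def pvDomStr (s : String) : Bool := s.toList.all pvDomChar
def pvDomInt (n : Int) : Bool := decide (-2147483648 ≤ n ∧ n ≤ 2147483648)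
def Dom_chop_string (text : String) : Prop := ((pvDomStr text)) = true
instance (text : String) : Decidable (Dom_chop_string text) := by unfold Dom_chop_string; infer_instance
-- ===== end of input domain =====

-- B replaces A's incremental string-building accumulator by a length-only scan for the
-- split index followed by slice/join/center; equivalence is proved for the return value.

-- str.center(w), as CPython computes it (shared: both Pythons call str.center)
def pvCenter (cs : List Char) (w : Nat) : List Char :=
  if w ≤ cs.length then cs
  else
    let marg := w - cs.length
    let left := marg / 2 + (marg &&& w &&& 1)
    List.replicate left ' ' ++ cs ++ List.replicate (marg - left) ' '

-- ===== PORT A =====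
-- the body of A's for-loop over words, state = (builder, firstLine)
def pvStepA (st : Option (List Char) × Option (List Char)) (word : List Char) :
    Option (List Char) × Option (List Char) :=
  match st.1 with
  | none => (some word, st.2)
  | some b =>
    match st.2 with
    | none =>
      if 16 < b.length + word.length + 1 then (some word, some (pvCenter b 16))
      else (some (b ++ ' ' :: word), none)
    | some f => (some (b ++ ' ' :: word), some f)

def chop_string (text : String) : List (Option String) :=
  let words := PySem.Chars.split₀ text.toList
  let st := words.foldl pvStepA (none, none)
  match st.1 with
  | none => []   -- Python raises TypeError (len(None)) here; excluded by Pre_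
  | some b =>
    let b := if b.length < 16 then pvCenter b 16 else b
    [st.2.map String.ofList, some (String.ofList b)]

-- ===== PORT B =====
-- B's for-with-break over enumerate(words): running joined length, first index i ≥ 1 overflowing 16
def pvFindSplit (total : Int) (i : Nat) : List (List Char) → Option Nat
  | [] => none
  | w :: ws =>
    let t := total + w.length + 1
    if 1 ≤ i ∧ 16 < t then some i else pvFindSplit t (i + 1) ws

def chop_string_alt (text : String) : List (Option String) :=
  let words := PySem.Chars.split₀ text.toList
  let fb :=
    match pvFindSplit (-1) 0 words with
    | none => ((none : Option (List Char)), PySem.Chars.join [' '] words)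
    | some i =>
      (some (pvCenter (PySem.Chars.join [' '] (PySem.List.slice words none (some (i : Int)))) 16),
       PySem.Chars.join [' '] (PySem.List.slice words (some (i : Int)) none))
  let builder := if fb.2.length < 16 then pvCenter fb.2 16 else fb.2
  [fb.1.map String.ofList, some (String.ofList builder)]

-- ===== PRECONDITION & SPEC =====
-- Pre_ excludes texts with no words (empty/whitespace-only): there A raises TypeError (len(None) on the never-assigned builder), returning nothing.
def Pre_chop_string (text : String) : Prop := PySem.Chars.split₀ text.toList ≠ []
instance (text : String) : Decidable (Pre_chop_string text) := by unfold Pre_chop_string; infer_instance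
def pvWitness_chop_string : String := "hello there world"

def Spec_chop_string (text : String) (out : List (Option String)) : Prop := out = chop_string_alt text
instance (text : String) (out : List (Option String)) : Decidable (Spec_chop_string text out) := by unfold Spec_chop_string; infer_instance

-- ===== CLAIM (what is proved, stated in full; the proofs are below) =====
def Claim_equal_chop_string : Prop := ∀ (text : String), Dom_chop_string text → Pre_chop_string text → Spec_chop_string text (chop_string text)

-- ===== LEMMAS AND PROOFS =====

-- once firstLine is closed, A's loop only appends: builder becomes the join of everything
-- joining after gluing one word onto the head with the separator
lemma pvJoinGlue (sep b w : List Char) (ws : List (List Char)) :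
    PySem.Chars.join sep ((b ++ sep ++ w) :: ws) = b ++ sep ++ PySem.Chars.join sep (w :: ws) := by
  cases ws with
  | nil => simp [PySem.Chars.join_singleton]
  | cons y ys => simp [PySem.Chars.join_cons_cons, List.append_assoc]

lemma pvGlueChar (b w : List Char) : b ++ ' ' :: w = b ++ [' '] ++ w := by simp

lemma foldl_stepA_closed (ws : List (List Char)) (b f : List Char) :
    List.foldl pvStepA (some b, some f) ws =
      (some (PySem.Chars.join [' '] (b :: ws)), some f) := by
  induction ws generalizing b with
  | nil => simp [PySem.Chars.join_singleton]
  | cons w ws ih =>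
      simp only [List.foldl_cons, pvStepA, ih, PySem.Chars.join_cons_cons]
      rw [pvGlueChar, pvJoinGlue]

lemma pvFindSplit_ge (ws : List (List Char)) (t : Int) (i j : Nat)
    (h : pvFindSplit t i ws = some j) : i ≤ j := by
  induction ws generalizing t i with
  | nil => simp [pvFindSplit] at h
  | cons w ws ih =>
      simp only [pvFindSplit] at h
      split at h
      · cases h; exact le_refl _
      · exact Nat.le_of_succ_le (ih _ _ h)

-- main invariant: A's open-phase loop vs B's split-index search, offset i
lemma foldl_stepA_open (ws : List (List Char)) (b : List Char) (i : Nat) (hi : 1 ≤ i) :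
    List.foldl pvStepA (some b, none) ws =
      match pvFindSplit (b.length : Int) i ws with
      | none => (some (PySem.Chars.join [' '] (b :: ws)), none)
      | some j =>
          (some (PySem.Chars.join [' '] (ws.drop (j - i))),
           some (pvCenter (PySem.Chars.join [' '] (b :: ws.take (j - i))) 16)) := by
  induction ws generalizing b i with
  | nil => simp [pvFindSplit, PySem.Chars.join_singleton]
  | cons w ws ih =>
      have hcond : ((1 ≤ i ∧ 16 < (b.length : Int) + (w.length : Int) + 1) ↔
          16 < b.length + w.length + 1) := by constructor <;> intro h <;> [omega; exact ⟨hi, by exact_mod_cast by omega⟩]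
      by_cases hc : 16 < b.length + w.length + 1
      · -- overflow at this word: A closes firstLine, B returns i
        have hfs : pvFindSplit (b.length : Int) i (w :: ws) = some i := by
          simp only [pvFindSplit]; rw [if_pos (hcond.mpr hc)]
        rw [hfs]
        simp only [List.foldl_cons, pvStepA, if_pos hc]
        rw [foldl_stepA_closed]
        simp [PySem.Chars.join_singleton]
      · -- no overflow: both advance with the extended prefix
        have hfs : pvFindSplit (b.length : Int) i (w :: ws) =
            pvFindSplit ((b.length : Int) + w.length + 1) (i + 1) ws := by
          simp only [pvFindSplit]; rw [if_neg (fun h => hc (hcond.mp h))]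
        rw [hfs]
        have hlen : ((b ++ ' ' :: w).length : Int) = (b.length : Int) + w.length + 1 := by
          simp; push_cast; ring
        simp only [List.foldl_cons, pvStepA, if_neg hc]
        rw [ih (b ++ ' ' :: w) (i + 1) (by omega), hlen]
        cases hsplit : pvFindSplit ((b.length : Int) + w.length + 1) (i + 1) ws with
        | none => rw [pvGlueChar, pvJoinGlue, PySem.Chars.join_cons_cons]
        | some j =>
            have hji : i + 1 ≤ j := pvFindSplit_ge _ _ _ _ hsplit
            have h1 : j - i = (j - (i + 1)) + 1 := by omega
            simp only [h1, List.drop_succ_cons, List.take_succ_cons]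
            rw [pvGlueChar, pvJoinGlue, PySem.Chars.join_cons_cons]

-- ===== VERDICT (by name: the statement is the Claim_ definition above) =====
theorem chop_string_spec : Claim_equal_chop_string := by
  intro text _dom hpre
  unfold Spec_chop_string chop_string chop_string_alt
  cases hw : PySem.Chars.split₀ text.toList with
  | nil => exact absurd hw hpre
  | cons w0 rest =>
      simp only [List.foldl_cons, pvStepA]
      have hstart : pvFindSplit (-1) 0 (w0 :: rest) =
          pvFindSplit (w0.length : Int) 1 rest := by
        simp only [pvFindSplit]
        rw [if_neg (by omega)]
        congr 1; omega
      rw [hstart, foldl_stepA_open rest w0 1 le_rfl]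
      cases hsplit : pvFindSplit (w0.length : Int) 1 rest with
      | none => rfl
      | some j =>
          have hj : 1 ≤ j := pvFindSplit_ge _ _ _ _ hsplit
          simp only [PySem.List.slice_to_natCast, PySem.List.slice_from_natCast]
          have htake : List.take j (w0 :: rest) = w0 :: List.take (j - 1) rest := by
            conv_lhs => rw [show j = (j - 1) + 1 by omega]
            simp
          have hdrop : List.drop j (w0 :: rest) = List.drop (j - 1) rest := by
            conv_lhs => rw [show j = (j - 1) + 1 by omega]
            simp
          rw [htake, hdrop]
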